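-- pv_equiv track=rewrite | github.com/blceditor/otyokwah | scripts/enhance-migrated-pages.py | fix_internal_links
-- ===== SOURCE A (Python) =====
-- def fix_internal_links(content):
--     """
--     Update internal WordPress links to new site structure
--
--     WordPress structure:
--         /summer-camp-2/ -> /summer-camp
--         /retreats -> /retreats
--         /rentals -> /rentals
--         /partners-in-ministry -> /partners  (TBD - page not migrated yet)
--     """
--     replacements = {
--         'http://www.bearlakecamp.com/summer-camp-2/': '/summer-camp',
--         'https://www.bearlakecamp.com/summer-camp-2/': '/summer-camp',
--         'http://www.bearlakecamp.com/retreats': '/retreats',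
--         'https://www.bearlakecamp.com/retreats': '/retreats',
--         'http://www.bearlakecamp.com/rentals': '/rentals',
--         'https://www.bearlakecamp.com/rentals': '/rentals',
--         'http://www.bearlakecamp.com/partners-in-ministry': '/partners  <!-- TBD: Partners page not migrated yet -->',
--         'https://www.bearlakecamp.com/partners-in-ministry': '/partners  <!-- TBD: Partners page not migrated yet -->',
--     }
--
--     for old, new in replacements.items():
--         content = content.replace(old, new)
--
--     return content
-- ===== SOURCE B (Python) =====
-- def fix_internal_links(content):
--     """
--     Update internal WordPress links to new site structure (single left-to-right pass).
--     """
--     replacements = {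
--         'http://www.bearlakecamp.com/summer-camp-2/': '/summer-camp',
--         'https://www.bearlakecamp.com/summer-camp-2/': '/summer-camp',
--         'http://www.bearlakecamp.com/retreats': '/retreats',
--         'https://www.bearlakecamp.com/retreats': '/retreats',
--         'http://www.bearlakecamp.com/rentals': '/rentals',
--         'https://www.bearlakecamp.com/rentals': '/rentals',
--         'http://www.bearlakecamp.com/partners-in-ministry': '/partners  <!-- TBD: Partners page not migrated yet -->',
--         'https://www.bearlakecamp.com/partners-in-ministry': '/partners  <!-- TBD: Partners page not migrated yet -->',
--     }
--     items = list(replacements.items())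
--     out = []
--     i = 0
--     n = len(content)
--     while i < n:
--         for old, new in items:
--             if content.startswith(old, i):
--                 out.append(new)
--                 i += len(old)
--                 break
--         else:
--             out.append(content[i])
--             i += 1
--     return ''.join(out)
-- ===== Notes on version B (the rewrite author's own statement) =====
-- stated objective: alternative
-- what changed: Replaces eight sequential full-string str.replace passes by a single left-to-right scan that substitutes the first matching WordPress URL at each position of the input.
import Mathlib
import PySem

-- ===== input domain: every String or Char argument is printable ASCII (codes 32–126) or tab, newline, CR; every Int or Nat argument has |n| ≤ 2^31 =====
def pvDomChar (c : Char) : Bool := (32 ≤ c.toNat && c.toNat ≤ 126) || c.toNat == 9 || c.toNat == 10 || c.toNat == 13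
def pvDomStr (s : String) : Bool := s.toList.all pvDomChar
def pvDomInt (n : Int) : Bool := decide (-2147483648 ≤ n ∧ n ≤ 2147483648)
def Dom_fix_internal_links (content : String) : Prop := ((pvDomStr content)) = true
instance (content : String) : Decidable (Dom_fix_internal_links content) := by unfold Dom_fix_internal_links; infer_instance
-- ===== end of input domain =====

-- B replaces A's eight sequential full-string replace passes by one left-to-right scan over the
-- input that substitutes the first matching URL at each position (objective: alternative algorithm,
-- one traversal instead of eight).

-- the WordPress-URL → new-path mapping (the dict literal both programs carry)
def pvReplacements : List (String × String) :=
  [("http://www.bearlakecamp.com/summer-camp-2/", "/summer-camp"),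
   ("https://www.bearlakecamp.com/summer-camp-2/", "/summer-camp"),
   ("http://www.bearlakecamp.com/retreats", "/retreats"),
   ("https://www.bearlakecamp.com/retreats", "/retreats"),
   ("http://www.bearlakecamp.com/rentals", "/rentals"),
   ("https://www.bearlakecamp.com/rentals", "/rentals"),
   ("http://www.bearlakecamp.com/partners-in-ministry",
    "/partners  <!-- TBD: Partners page not migrated yet -->"),
   ("https://www.bearlakecamp.com/partners-in-ministry",
    "/partners  <!-- TBD: Partners page not migrated yet -->")]

-- ===== PORT A =====
-- for old, new in replacements.items(): content = content.replace(old, new)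
def fix_internal_links (content : String) : String :=
  ((PySem.Dict.ofList pvReplacements).items).foldl
    (fun c kv => PySem.Str.replace c kv.1 kv.2) content

-- ===== PORT B =====
-- items = list(replacements.items()), held as char lists
def pvKvs : List (List Char × List Char) :=
  pvReplacements.map (fun kv => (kv.1.toList, kv.2.toList))

-- the inner `for old, new in items: if content.startswith(old, i): … break / else: …`:
-- first pair whose key starts at position i (exact for 0 ≤ i ≤ len; the `!isEmpty` guard is
-- never false — every key of the table is nonempty)
def pvFindKv (s : List Char) (i : Nat) : Option (List Char × List Char) :=
  pvKvs.find? (fun kv => !kv.1.isEmpty && kv.1.isPrefixOf (s.drop i))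

-- the `while i < n` loop accumulating `out`; the fuel argument (started at n, one unit per
-- iteration, i strictly increases each iteration) only makes the recursion structural
def pvLoop (s : List Char) : Nat → Nat → List (List Char) → List (List Char)
  | 0, _, out => out
  | fuel + 1, i, out =>
    if i < s.length then
      match pvFindKv s i with
      | some kv => pvLoop s fuel (i + kv.1.length) (out ++ [kv.2])
      | none => pvLoop s fuel (i + 1) (out ++ [[s.getD i ' ']])   -- content[i], in range
    else out

-- ''.join(out)
def fix_internal_links_alt (content : String) : String :=
  String.ofList (pvLoop content.toList content.toList.length 0 []).flatten

-- ===== PRECONDITION & SPEC =====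
-- Pre_ excludes exactly the contents containing one of the four literal cascade substrings below
-- (an https bearlakecamp host, or the https summer-camp URL without its trailing slash,
-- immediately abutting one of the mapped http URLs): on those, A's eight sequential passes can
-- also rewrite a URL that was only re-created by an earlier pass's own replacement output, while
-- B's single pass replaces only URLs present in the original content — an order-of-passes
-- cascade corner no caller of this migration helper specifies, where either value is defensible.
-- (PySem.Chars.isIn sub s = true ↔ sub occurs as a contiguous substring of s, lemma
-- PySem.Chars.isIn_iff_infix.)
def Pre_fix_internal_links (content : String) : Prop :=
  ¬ ∃ p ∈ (["https://www.bearlakecamp.com/summer-camp-2http://www.bearlakecamp.com/summer-camp-2/",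
            "https://www.bearlakecamp.comhttp://www.bearlakecamp.com/summer-camp-2/",
            "https://www.bearlakecamp.comhttp://www.bearlakecamp.com/retreats",
            "https://www.bearlakecamp.comhttp://www.bearlakecamp.com/rentals"] : List String),
    PySem.Chars.isIn p.toList content.toList = true
instance (content : String) : Decidable (Pre_fix_internal_links content) := by
  unfold Pre_fix_internal_links; infer_instance

def pvWitness_fix_internal_links : String :=
  "Camp info: https://www.bearlakecamp.com/retreats and http://www.bearlakecamp.com/rentals"

def Spec_fix_internal_links (content : String) (out : String) : Prop :=
  out = fix_internal_links_alt content
instance (content : String) (out : String) : Decidable (Spec_fix_internal_links content out) := by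
  unfold Spec_fix_internal_links; infer_instance

-- ===== CLAIM (what is proved, stated in full; the proofs are below) =====
def Claim_equal_fix_internal_links : Prop :=
  ∀ (content : String), Dom_fix_internal_links content → Pre_fix_internal_links content →
    Spec_fix_internal_links content (fix_internal_links content)

-- ===== LEMMAS AND PROOFS =====

-- first pair of the table whose key is a prefix of s (the shape both ports reduce to)
def tryKeys (kvs : List (List Char × List Char)) (s : List Char) : Option (List Char × List Char) :=
  kvs.find? (fun kv => !kv.1.isEmpty && kv.1.isPrefixOf s)

lemma tryKeys_some_facts {kvs : List (List Char × List Char)} {s : List Char}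
    {kv : List Char × List Char} (h : tryKeys kvs s = some kv) :
    kv ∈ kvs ∧ kv.1 ≠ [] ∧ kv.1 <+: s := by
  have h1 := List.mem_of_find?_eq_some h
  have h2 := List.find?_some h
  simp only [Bool.and_eq_true, Bool.not_eq_true', List.isEmpty_eq_false_iff,
    List.isPrefixOf_iff_prefix] at h2
  exact ⟨h1, h2.1, h2.2⟩

lemma tryKeys_eq_none {kvs : List (List Char × List Char)} {s : List Char}
    (h : ∀ kv ∈ kvs, kv.1 ≠ [] → ¬ kv.1 <+: s) : tryKeys kvs s = none := by
  refine List.find?_eq_none.mpr ?_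
  intro kv hkv
  simp only [Bool.and_eq_true, Bool.not_eq_true', List.isEmpty_eq_false_iff,
    List.isPrefixOf_iff_prefix, not_and]
  exact h kv hkv

-- simultaneous one-pass replacement (proof-side model of B, parameterised by the table)
def mscan (kvs : List (List Char × List Char)) : List Char → List Char
  | [] => []
  | c :: t =>
    match h : tryKeys kvs (c :: t) with
    | some kv => kv.2 ++ mscan kvs ((c :: t).drop kv.1.length)
    | none => c :: mscan kvs t
termination_by s => s.length
decreasing_by
  · have := (tryKeys_some_facts h).2.1
    have : 0 < kv.1.length := List.length_pos_iff.mpr this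
    simp [List.length_drop]; omega
  · simp

lemma mscan_nil_input (kvs : List (List Char × List Char)) : mscan kvs [] = [] := by
  simp [mscan]

lemma mscan_cons_some {kvs : List (List Char × List Char)} {c : Char} {t : List Char}
    {kv : List Char × List Char} (h : tryKeys kvs (c :: t) = some kv) :
    mscan kvs (c :: t) = kv.2 ++ mscan kvs ((c :: t).drop kv.1.length) := by
  rw [mscan]; split <;> simp_all

lemma mscan_cons_none {kvs : List (List Char × List Char)} {c : Char} {t : List Char}
    (h : tryKeys kvs (c :: t) = none) :
    mscan kvs (c :: t) = c :: mscan kvs t := by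
  rw [mscan]; split <;> simp_all

lemma tryKeys_nil_input (kvs : List (List Char × List Char)) : tryKeys kvs [] = none := by
  refine tryKeys_eq_none ?_
  intro kv _ hne hpre
  exact hne (List.prefix_nil.mp hpre)

lemma mscan_eq_some {kvs : List (List Char × List Char)} {s : List Char}
    {kv : List Char × List Char} (h : tryKeys kvs s = some kv) :
    mscan kvs s = kv.2 ++ mscan kvs (s.drop kv.1.length) := by
  cases s with
  | nil => rw [tryKeys_nil_input] at h; cases h
  | cons c t => exact mscan_cons_some h

lemma prefix_append_cases {S v Y : List Char} (h : S <+: v ++ Y) : S <+: v ∨ v <+: S := by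
  rcases Nat.lt_or_ge v.length S.length with hl | hl
  · exact Or.inr (List.prefix_of_prefix_length_le (List.prefix_append v Y) h (le_of_lt hl))
  · exact Or.inl (List.prefix_of_prefix_length_le h (List.prefix_append v Y) hl)

-- CPython's str.replace IS the single-key left-to-right scan
lemma go_eq_mscan (k v : List Char) (hk : ¬ k.isEmpty = true) :
    ∀ (fuel : Nat) (l acc : List Char), l.length ≤ fuel →
      PySem.Chars.replace.go k v fuel l acc = acc.reverse ++ mscan [(k, v)] l := by
  intro fuel
  induction fuel with
  | zero =>
      intro l acc hl
      have : l = [] := List.eq_nil_of_length_eq_zero (Nat.le_zero.mp hl)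
      subst this
      rw [PySem.Chars.replace.go.eq_def]
      simp [mscan_nil_input]
  | succ fuel ih =>
      intro l acc hl
      cases l with
      | nil =>
          rw [PySem.Chars.replace.go.eq_def]
          simp [mscan_nil_input]
      | cons c t =>
          rw [PySem.Chars.replace.go.eq_def]
          simp only []
          by_cases hpre : k.isPrefixOf (c :: t) = true
          · rw [if_pos hpre]
            have hkne : k ≠ [] := by
              intro h; subst h; simp at hk
            have hklen : 0 < k.length := List.length_pos_iff.mpr hkne
            have hlen : (List.drop k.length (c :: t)).length ≤ fuel := by
              simp only [List.length_drop, List.length_cons]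
              simp only [List.length_cons] at hl
              omega
            rw [ih _ _ hlen]
            have htk : tryKeys [(k, v)] (c :: t) = some (k, v) := by
              unfold tryKeys
              rw [List.find?_cons_of_pos]
              simp [hk, hpre]
            rw [mscan_cons_some htk]
            simp [List.append_assoc]
          · rw [if_neg hpre]
            have hlen : t.length ≤ fuel := by
              simp only [List.length_cons] at hl; omega
            rw [ih _ _ hlen]
            have htk : tryKeys [(k, v)] (c :: t) = none := by
              unfold tryKeys
              rw [List.find?_cons_of_neg]
              · rfl
              · simp [hpre]
            rw [mscan_cons_none htk]
            simp

lemma replace_eq_mscan (s k v : List Char) (hk : ¬ k.isEmpty = true) :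
    PySem.Chars.replace s k v = mscan [(k, v)] s := by
  rw [PySem.Chars.replace, if_neg hk]
  rw [go_eq_mscan k v hk s.length s [] le_rfl]
  simp

-- a run of characters none of which is 'h' is copied verbatim (all keys start with 'h')
lemma hfree_copy {kvs : List (List Char × List Char)}
    (hk : ∀ kv ∈ kvs, kv.1.head? = some 'h') (u r : List Char) (hu : 'h' ∉ u) :
    mscan kvs (u ++ r) = u ++ mscan kvs r := by
  induction u with
  | nil => simp
  | cons c u' ih =>
      have hc : c ≠ 'h' := by
        intro h; exact hu (h ▸ List.mem_cons_self)
      have hnone : tryKeys kvs (c :: (u' ++ r)) = none := by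
        refine tryKeys_eq_none ?_
        intro kv hkv hne hpre
        have hh := hk kv hkv
        cases hkv1 : kv.1 with
        | nil => exact hne hkv1
        | cons a b =>
            rw [hkv1] at hh hpre
            simp only [List.head?_cons, Option.some.injEq] at hh
            obtain ⟨hab, -⟩ := List.cons_prefix_cons.mp hpre
            exact hc (by rw [← hab]; exact hh)
      rw [List.cons_append, mscan_cons_none hnone,
        ih (fun h => hu (List.mem_cons_of_mem _ h))]
      rfl

-- a partial key match surviving through the scan output either existed in the input
-- or crosses a replacement site, exhibiting a (prefix-of-key ++ key) infix pattern
lemma crux {kvs : List (List Char × List Char)} {kj : List Char} :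
    ∀ (n : Nat) (s : List Char) (p : Nat), s.length ≤ n → 0 < p → p < kj.length →
      kj.drop p <+: mscan kvs s →
      kj.drop p <+: s ∨
        ∃ kv ∈ kvs, ∃ p' : Nat, 0 < p' ∧ p' < kj.length ∧
          (kj.drop p' <+: kv.2 ∨ kv.2 <+: kj.drop p') ∧
          (kj.take p' ++ kv.1) <:+: (kj.take p ++ s) := by
  intro n
  induction n with
  | zero =>
      intro s p hl hp0 hpl hyp
      have hs : s = [] := List.eq_nil_of_length_eq_zero (Nat.le_zero.mp hl)
      subst hs
      rw [mscan_nil_input] at hyp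
      have := congrArg List.length (List.prefix_nil.mp hyp)
      simp only [List.length_drop, List.length_nil] at this
      omega
  | succ n ih =>
      intro s p hl hp0 hpl hyp
      cases s with
      | nil =>
          rw [mscan_nil_input] at hyp
          have := congrArg List.length (List.prefix_nil.mp hyp)
          simp only [List.length_drop, List.length_nil] at this
          omega
      | cons c t =>
          cases hm : tryKeys kvs (c :: t) with
          | some kv =>
              rw [mscan_cons_some hm] at hyp
              obtain ⟨hmem, hne, hpre⟩ := tryKeys_some_facts hm
              right
              refine ⟨kv, hmem, p, hp0, hpl, prefix_append_cases hyp, ?_⟩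
              exact ((List.prefix_append_right_inj (kj.take p)).mpr hpre).isInfix
          | none =>
              rw [mscan_cons_none hm] at hyp
              have hd : kj.drop p = kj[p] :: kj.drop (p + 1) := List.drop_eq_getElem_cons hpl
              rw [hd] at hyp
              obtain ⟨hc, htl⟩ := List.cons_prefix_cons.mp hyp
              by_cases hpe : p + 1 = kj.length
              · left
                rw [hd, hc]
                have : kj.drop (p + 1) = [] := List.drop_eq_nil_of_le (le_of_eq hpe.symm)
                rw [this]
                exact List.cons_prefix_cons.mpr ⟨rfl, List.nil_prefix⟩
              · have hlt : t.length ≤ n := by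
                  simp only [List.length_cons] at hl; omega
                rcases ih t (p + 1) hlt (Nat.succ_pos p) (by omega) htl with hL | ⟨kv, hmem, p', h1, h2, h3, hinf⟩
                · left
                  rw [hd, hc]
                  exact List.cons_prefix_cons.mpr ⟨rfl, hL⟩
                · right
                  refine ⟨kv, hmem, p', h1, h2, h3, ?_⟩
                  have hts : kj.take (p + 1) = kj.take p ++ [kj[p]] := by
                    rw [List.take_succ, List.getElem?_eq_getElem hpl]
                    rfl
                  rw [hts, hc, List.append_assoc, List.singleton_append] at hinf
                  exact hinf

-- one more sequential pass with key kj after the simultaneous pass over kvs equals the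
-- simultaneous pass over kvs ++ [kj], away from the cascade patterns
lemma mstep (kvs : List (List Char × List Char)) (kj vj : List Char)
    (hker : ∀ kv ∈ kvs, kv.1.head? = some 'h' ∧ 'h' ∉ kv.2 ∧ ¬ kv.1 <+: kj ∧ ¬ kj <+: kv.1)
    (hj0 : kj.head? = some 'h') (hjt : 'h' ∉ kj.tail) :
    ∀ (n : Nat) (s : List Char), s.length ≤ n →
      (∀ kv ∈ kvs, ∀ p' : Nat, 0 < p' → p' < kj.length →
        (kj.drop p' <+: kv.2 ∨ kv.2 <+: kj.drop p') → ¬ (kj.take p' ++ kv.1) <:+: s) →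
      mscan [(kj, vj)] (mscan kvs s) = mscan (kvs ++ [(kj, vj)]) s := by
  have hkj_cons : kj = 'h' :: kj.tail := by
    cases kj with
    | nil => simp at hj0
    | cons a b =>
        simp only [List.head?_cons, Option.some.injEq] at hj0
        rw [hj0]; rfl
  have hkjne : kj ≠ [] := by rw [hkj_cons]; simp
  have hkheads : ∀ kv ∈ kvs, kv.1.head? = some 'h' := fun kv h => (hker kv h).1
  intro n
  induction n with
  | zero =>
      intro s hl _
      have hs : s = [] := List.eq_nil_of_length_eq_zero (Nat.le_zero.mp hl)
      subst hs
      simp [mscan_nil_input]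
  | succ n ih =>
      intro s hl hpat
      cases s with
      | nil => simp [mscan_nil_input]
      | cons c t =>
          cases hm : tryKeys kvs (c :: t) with
          | some kv =>
              obtain ⟨hmem, hne, hpre⟩ := tryKeys_some_facts hm
              obtain ⟨hh, hhv, hnk1, hnk2⟩ := hker kv hmem
              rw [mscan_cons_some hm]
              have hm2 : tryKeys (kvs ++ [(kj, vj)]) (c :: t) = some kv := by
                unfold tryKeys at hm ⊢
                rw [List.find?_append, hm]
                rfl
              rw [mscan_cons_some hm2]
              rw [hfree_copy (kvs := [(kj, vj)]) (by
                    intro kv' hkv'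
                    simp only [List.mem_singleton] at hkv'
                    rw [hkv']
                    rw [hkj_cons]; rfl) kv.2 _ hhv]
              have hsuf : (c :: t).drop kv.1.length <:+ (c :: t) := List.drop_suffix _ _
              have hlen : ((c :: t).drop kv.1.length).length ≤ n := by
                have : 0 < kv.1.length := List.length_pos_iff.mpr hne
                simp only [List.length_drop, List.length_cons]
                simp only [List.length_cons] at hl
                omega
              rw [ih _ hlen (fun kv' hm' p' a b cpt hinf =>
                hpat kv' hm' p' a b cpt (hinf.trans hsuf.isInfix))]
          | none =>
              by_cases hj : kj <+: (c :: t)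
              · obtain ⟨r, hr⟩ := hj
                have hC : mscan kvs (c :: t) = kj ++ mscan kvs r := by
                  conv_lhs => rw [← hr, hkj_cons, List.cons_append]
                  rw [mscan_cons_none (by rw [← List.cons_append, ← hkj_cons, hr]; exact hm)]
                  rw [hfree_copy hkheads kj.tail r hjt, ← List.cons_append, ← hkj_cons]
                rw [hC]
                have hset : tryKeys [(kj, vj)] (kj ++ mscan kvs r) = some (kj, vj) := by
                  unfold tryKeys
                  rw [List.find?_cons_of_pos]
                  simp only [Bool.and_eq_true, Bool.not_eq_true', List.isEmpty_eq_false_iff,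
                    List.isPrefixOf_iff_prefix]
                  exact ⟨by simpa using hkjne, List.prefix_append _ _⟩
                rw [mscan_eq_some hset]
                simp only [List.drop_left]
                have hm2 : tryKeys (kvs ++ [(kj, vj)]) (c :: t) = some (kj, vj) := by
                  unfold tryKeys at hm ⊢
                  rw [List.find?_append, hm]
                  simp only [Option.none_or]
                  rw [List.find?_cons_of_pos]
                  simp only [Bool.and_eq_true, Bool.not_eq_true', List.isEmpty_eq_false_iff,
                    List.isPrefixOf_iff_prefix]
                  exact ⟨by simpa using hkjne, ⟨r, hr⟩⟩
                rw [mscan_eq_some hm2]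
                have hdr : (c :: t).drop kj.length = r := by
                  rw [← hr, List.drop_left]
                rw [hdr]
                have hrlen : r.length ≤ n := by
                  have h5 : kj.length + r.length = t.length + 1 := by
                    simpa using congrArg List.length hr
                  have hpos : 0 < kj.length := List.length_pos_iff.mpr hkjne
                  simp only [List.length_cons] at hl
                  omega
                have hrsuf : r <:+ (c :: t) := ⟨kj, hr⟩
                rw [ih r hrlen (fun kv' hm' p' a b cpt hinf =>
                  hpat kv' hm' p' a b cpt (hinf.trans hrsuf.isInfix))]
              · have hm2 : tryKeys (kvs ++ [(kj, vj)]) (c :: t) = none := by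
                  unfold tryKeys at hm ⊢
                  rw [List.find?_append, hm]
                  simp only [Option.none_or]
                  rw [List.find?_cons_of_neg]
                  · rfl
                  · simp only [Bool.and_eq_true, Bool.not_eq_true', List.isEmpty_eq_false_iff,
                      List.isPrefixOf_iff_prefix, not_and]
                    exact fun _ => hj
                rw [mscan_cons_none hm, mscan_cons_none hm2]
                have hnone1 : tryKeys [(kj, vj)] (c :: mscan kvs t) = none := by
                  refine tryKeys_eq_none ?_
                  intro kv' hkv' _ hpre
                  simp only [List.mem_singleton] at hkv'
                  rw [hkv'] at hpre
                  have hpre1 : kj <+: c :: mscan kvs t := hpre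
                  rw [hkj_cons] at hpre1
                  obtain ⟨hch, htl⟩ := List.cons_prefix_cons.mp hpre1
                  by_cases h1 : kj.length = 1
                  · apply hj
                    have : kj.tail = [] := by
                      have := congrArg List.length hkj_cons
                      simp only [List.length_cons] at this
                      exact List.eq_nil_of_length_eq_zero (by omega)
                    rw [hkj_cons, this, hch]
                    exact List.cons_prefix_cons.mpr ⟨rfl, List.nil_prefix⟩
                  · have hgt : 1 < kj.length := by
                      have : 0 < kj.length := List.length_pos_iff.mpr hkjne
                      omega
                    have htl' : kj.drop 1 <+: mscan kvs t := by
                      rw [List.drop_one]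
                      conv_lhs => rw [hkj_cons]
                      simpa using htl
                    rcases crux (kvs := kvs) (kj := kj) t.length t 1 le_rfl one_pos hgt htl'
                      with hL | ⟨kv2, hmem2, p', a, b, cpt, hinf⟩
                    · apply hj
                      rw [hkj_cons, hch]
                      refine List.cons_prefix_cons.mpr ⟨rfl, ?_⟩
                      rw [List.drop_one] at hL
                      conv at hL => lhs; rw [hkj_cons]
                      simpa using hL
                    · have hto : kj.take 1 = [c] := by
                        conv_lhs => rw [hkj_cons]
                        rw [hch]
                        simp
                      rw [hto, List.singleton_append] at hinf
                      exact hpat kv2 hmem2 p' a b cpt hinf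
                rw [mscan_cons_none hnone1]
                have hlt : t.length ≤ n := by
                  simp only [List.length_cons] at hl; omega
                have htsuf : t <:+ (c :: t) := ⟨[c], rfl⟩
                rw [ih t hlt (fun kv' hm' p' a b cpt hinf =>
                  hpat kv' hm' p' a b cpt (hinf.trans htsuf.isInfix))]

-- the four cascade strings of Pre_fix_internal_links, named for the proofs
def pvCascades : List String :=
  ["https://www.bearlakecamp.com/summer-camp-2http://www.bearlakecamp.com/summer-camp-2/",
        "https://www.bearlakecamp.comhttp://www.bearlakecamp.com/summer-camp-2/",
        "https://www.bearlakecamp.comhttp://www.bearlakecamp.com/retreats",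
        "https://www.bearlakecamp.comhttp://www.bearlakecamp.com/rentals"]

-- the four cascade patterns of Pre_fix_internal_links, as char lists
def pvPatsC : List (List Char) := pvCascades.map String.toList

-- turn the decidable per-table facts plus absence of the cascade patterns into mstep's side condition
lemma hpat_of_hD (kvs : List (List Char × List Char)) (kj : List Char) (s : List Char)
    (hD : ∀ p ∈ pvPatsC, ¬ p <:+: s)
    (hstep : ∀ kv ∈ kvs, ∀ p' ∈ List.range kj.length, 0 < p' →
        (kj.drop p' <+: kv.2 ∨ kv.2 <+: kj.drop p') → ∃ q ∈ pvPatsC, q = kj.take p' ++ kv.1) :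
    ∀ kv ∈ kvs, ∀ p' : Nat, 0 < p' → p' < kj.length →
      (kj.drop p' <+: kv.2 ∨ kv.2 <+: kj.drop p') → ¬ (kj.take p' ++ kv.1) <:+: s := by
  intro kv hmem p' h0 hlt hcomp hinf
  obtain ⟨q, hq, he⟩ := hstep kv hmem p' (List.mem_range.mpr hlt) h0 hcomp
  exact hD q hq (he ▸ hinf)

-- ===== assembling the two ports =====

lemma items_ofList : (PySem.Dict.ofList pvReplacements).items = pvReplacements := by
  decide

lemma A_toList (content : String) :
    (fix_internal_links content).toList =
      mscan [(("https://www.bearlakecamp.com/partners-in-ministry").toList,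
              ("/partners  <!-- TBD: Partners page not migrated yet -->").toList)]
      (mscan [(("http://www.bearlakecamp.com/partners-in-ministry").toList,
              ("/partners  <!-- TBD: Partners page not migrated yet -->").toList)]
      (mscan [(("https://www.bearlakecamp.com/rentals").toList, ("/rentals").toList)]
      (mscan [(("http://www.bearlakecamp.com/rentals").toList, ("/rentals").toList)]
      (mscan [(("https://www.bearlakecamp.com/retreats").toList, ("/retreats").toList)]
      (mscan [(("http://www.bearlakecamp.com/retreats").toList, ("/retreats").toList)]
      (mscan [(("https://www.bearlakecamp.com/summer-camp-2/").toList, ("/summer-camp").toList)]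
      (mscan [(("http://www.bearlakecamp.com/summer-camp-2/").toList, ("/summer-camp").toList)]
        content.toList))))))) := by
  unfold fix_internal_links
  rw [items_ofList]
  unfold pvReplacements
  simp only [List.foldl_cons, List.foldl_nil]
  simp only [PySem.Str.toList_replace]
  rw [replace_eq_mscan _ _ _ (by decide), replace_eq_mscan _ _ _ (by decide),
    replace_eq_mscan _ _ _ (by decide), replace_eq_mscan _ _ _ (by decide),
    replace_eq_mscan _ _ _ (by decide), replace_eq_mscan _ _ _ (by decide),
    replace_eq_mscan _ _ _ (by decide), replace_eq_mscan _ _ _ (by decide)]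

lemma pvLoop_bridge (s : List Char) :
    ∀ (fuel i : Nat) (out : List (List Char)), s.length - i ≤ fuel →
      (pvLoop s fuel i out).flatten = out.flatten ++ mscan pvKvs (s.drop i) := by
  intro fuel
  induction fuel with
  | zero =>
      intro i out hl
      have : s.drop i = [] := List.drop_eq_nil_of_le (by omega)
      rw [pvLoop, this, mscan_nil_input, List.append_nil]
  | succ fuel ih =>
      intro i out hl
      by_cases h : i < s.length
      · have hfk : pvFindKv s i = tryKeys pvKvs (s.drop i) := rfl
        have hdi : s.drop i = s[i] :: s.drop (i + 1) := List.drop_eq_getElem_cons h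
        cases hm : tryKeys pvKvs (s.drop i) with
        | some kv =>
            rw [pvLoop, if_pos h, hfk, hm]
            have hpos : 0 < kv.1.length :=
              List.length_pos_iff.mpr (tryKeys_some_facts hm).2.1
            rw [ih (i + kv.1.length) _ (by omega)]
            rw [mscan_eq_some hm, List.drop_drop]
            simp
        | none =>
            rw [pvLoop, if_pos h, hfk, hm]
            rw [ih (i + 1) _ (by omega)]
            rw [hdi, mscan_cons_none (hdi ▸ hm)]
            have : s.getD i ' ' = s[i] := List.getD_eq_getElem s ' ' h
            rw [this]
            simp
      · rw [pvLoop, if_neg h]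
        have : s.drop i = [] := List.drop_eq_nil_of_le (by omega)
        rw [this, mscan_nil_input, List.append_nil]

lemma B_toList (content : String) :
    (fix_internal_links_alt content).toList = mscan pvKvs content.toList := by
  unfold fix_internal_links_alt
  rw [String.toList_ofList]
  rw [pvLoop_bridge content.toList content.toList.length 0 [] (by omega)]
  simp

set_option maxRecDepth 1000000 in
set_option maxHeartbeats 4000000 in
lemma chain (s : List Char) (hD : ∀ p ∈ pvPatsC, ¬ p <:+: s) :
      mscan [(("https://www.bearlakecamp.com/partners-in-ministry").toList,
              ("/partners  <!-- TBD: Partners page not migrated yet -->").toList)]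
      (mscan [(("http://www.bearlakecamp.com/partners-in-ministry").toList,
              ("/partners  <!-- TBD: Partners page not migrated yet -->").toList)]
      (mscan [(("https://www.bearlakecamp.com/rentals").toList, ("/rentals").toList)]
      (mscan [(("http://www.bearlakecamp.com/rentals").toList, ("/rentals").toList)]
      (mscan [(("https://www.bearlakecamp.com/retreats").toList, ("/retreats").toList)]
      (mscan [(("http://www.bearlakecamp.com/retreats").toList, ("/retreats").toList)]
      (mscan [(("https://www.bearlakecamp.com/summer-camp-2/").toList, ("/summer-camp").toList)]
      (mscan [(("http://www.bearlakecamp.com/summer-camp-2/").toList, ("/summer-camp").toList)]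
        s))))))) = mscan pvKvs s := by
  have e2 : mscan [(("https://www.bearlakecamp.com/summer-camp-2/").toList, ("/summer-camp").toList)] (mscan [(("http://www.bearlakecamp.com/summer-camp-2/").toList, ("/summer-camp").toList)] s) = mscan [(("http://www.bearlakecamp.com/summer-camp-2/").toList, ("/summer-camp").toList),
      (("https://www.bearlakecamp.com/summer-camp-2/").toList, ("/summer-camp").toList)] s :=
    mstep [(("http://www.bearlakecamp.com/summer-camp-2/").toList, ("/summer-camp").toList)] ("https://www.bearlakecamp.com/summer-camp-2/").toList ("/summer-camp").toList
      (by decide) (by decide) (by decide) s.length s le_rfl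
      (hpat_of_hD _ _ s hD (by decide))
  have e3 : mscan [(("http://www.bearlakecamp.com/retreats").toList, ("/retreats").toList)] (mscan [(("http://www.bearlakecamp.com/summer-camp-2/").toList, ("/summer-camp").toList),
      (("https://www.bearlakecamp.com/summer-camp-2/").toList, ("/summer-camp").toList)] s) = mscan [(("http://www.bearlakecamp.com/summer-camp-2/").toList, ("/summer-camp").toList),
      (("https://www.bearlakecamp.com/summer-camp-2/").toList, ("/summer-camp").toList),
      (("http://www.bearlakecamp.com/retreats").toList, ("/retreats").toList)] s :=
    mstep [(("http://www.bearlakecamp.com/summer-camp-2/").toList, ("/summer-camp").toList),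
      (("https://www.bearlakecamp.com/summer-camp-2/").toList, ("/summer-camp").toList)] ("http://www.bearlakecamp.com/retreats").toList ("/retreats").toList
      (by decide) (by decide) (by decide) s.length s le_rfl
      (hpat_of_hD _ _ s hD (by decide))
  have e4 : mscan [(("https://www.bearlakecamp.com/retreats").toList, ("/retreats").toList)] (mscan [(("http://www.bearlakecamp.com/summer-camp-2/").toList, ("/summer-camp").toList),
      (("https://www.bearlakecamp.com/summer-camp-2/").toList, ("/summer-camp").toList),
      (("http://www.bearlakecamp.com/retreats").toList, ("/retreats").toList)] s) = mscan [(("http://www.bearlakecamp.com/summer-camp-2/").toList, ("/summer-camp").toList),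
      (("https://www.bearlakecamp.com/summer-camp-2/").toList, ("/summer-camp").toList),
      (("http://www.bearlakecamp.com/retreats").toList, ("/retreats").toList),
      (("https://www.bearlakecamp.com/retreats").toList, ("/retreats").toList)] s :=
    mstep [(("http://www.bearlakecamp.com/summer-camp-2/").toList, ("/summer-camp").toList),
      (("https://www.bearlakecamp.com/summer-camp-2/").toList, ("/summer-camp").toList),
      (("http://www.bearlakecamp.com/retreats").toList, ("/retreats").toList)] ("https://www.bearlakecamp.com/retreats").toList ("/retreats").toList
      (by decide) (by decide) (by decide) s.length s le_rfl
      (hpat_of_hD _ _ s hD (by decide))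
  have e5 : mscan [(("http://www.bearlakecamp.com/rentals").toList, ("/rentals").toList)] (mscan [(("http://www.bearlakecamp.com/summer-camp-2/").toList, ("/summer-camp").toList),
      (("https://www.bearlakecamp.com/summer-camp-2/").toList, ("/summer-camp").toList),
      (("http://www.bearlakecamp.com/retreats").toList, ("/retreats").toList),
      (("https://www.bearlakecamp.com/retreats").toList, ("/retreats").toList)] s) = mscan [(("http://www.bearlakecamp.com/summer-camp-2/").toList, ("/summer-camp").toList),
      (("https://www.bearlakecamp.com/summer-camp-2/").toList, ("/summer-camp").toList),
      (("http://www.bearlakecamp.com/retreats").toList, ("/retreats").toList),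
      (("https://www.bearlakecamp.com/retreats").toList, ("/retreats").toList),
      (("http://www.bearlakecamp.com/rentals").toList, ("/rentals").toList)] s :=
    mstep [(("http://www.bearlakecamp.com/summer-camp-2/").toList, ("/summer-camp").toList),
      (("https://www.bearlakecamp.com/summer-camp-2/").toList, ("/summer-camp").toList),
      (("http://www.bearlakecamp.com/retreats").toList, ("/retreats").toList),
      (("https://www.bearlakecamp.com/retreats").toList, ("/retreats").toList)] ("http://www.bearlakecamp.com/rentals").toList ("/rentals").toList
      (by decide) (by decide) (by decide) s.length s le_rfl
      (hpat_of_hD _ _ s hD (by decide))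
  have e6 : mscan [(("https://www.bearlakecamp.com/rentals").toList, ("/rentals").toList)] (mscan [(("http://www.bearlakecamp.com/summer-camp-2/").toList, ("/summer-camp").toList),
      (("https://www.bearlakecamp.com/summer-camp-2/").toList, ("/summer-camp").toList),
      (("http://www.bearlakecamp.com/retreats").toList, ("/retreats").toList),
      (("https://www.bearlakecamp.com/retreats").toList, ("/retreats").toList),
      (("http://www.bearlakecamp.com/rentals").toList, ("/rentals").toList)] s) = mscan [(("http://www.bearlakecamp.com/summer-camp-2/").toList, ("/summer-camp").toList),
      (("https://www.bearlakecamp.com/summer-camp-2/").toList, ("/summer-camp").toList),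
      (("http://www.bearlakecamp.com/retreats").toList, ("/retreats").toList),
      (("https://www.bearlakecamp.com/retreats").toList, ("/retreats").toList),
      (("http://www.bearlakecamp.com/rentals").toList, ("/rentals").toList),
      (("https://www.bearlakecamp.com/rentals").toList, ("/rentals").toList)] s :=
    mstep [(("http://www.bearlakecamp.com/summer-camp-2/").toList, ("/summer-camp").toList),
      (("https://www.bearlakecamp.com/summer-camp-2/").toList, ("/summer-camp").toList),
      (("http://www.bearlakecamp.com/retreats").toList, ("/retreats").toList),
      (("https://www.bearlakecamp.com/retreats").toList, ("/retreats").toList),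
      (("http://www.bearlakecamp.com/rentals").toList, ("/rentals").toList)] ("https://www.bearlakecamp.com/rentals").toList ("/rentals").toList
      (by decide) (by decide) (by decide) s.length s le_rfl
      (hpat_of_hD _ _ s hD (by decide))
  have e7 : mscan [(("http://www.bearlakecamp.com/partners-in-ministry").toList, ("/partners  <!-- TBD: Partners page not migrated yet -->").toList)] (mscan [(("http://www.bearlakecamp.com/summer-camp-2/").toList, ("/summer-camp").toList),
      (("https://www.bearlakecamp.com/summer-camp-2/").toList, ("/summer-camp").toList),
      (("http://www.bearlakecamp.com/retreats").toList, ("/retreats").toList),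
      (("https://www.bearlakecamp.com/retreats").toList, ("/retreats").toList),
      (("http://www.bearlakecamp.com/rentals").toList, ("/rentals").toList),
      (("https://www.bearlakecamp.com/rentals").toList, ("/rentals").toList)] s) = mscan [(("http://www.bearlakecamp.com/summer-camp-2/").toList, ("/summer-camp").toList),
      (("https://www.bearlakecamp.com/summer-camp-2/").toList, ("/summer-camp").toList),
      (("http://www.bearlakecamp.com/retreats").toList, ("/retreats").toList),
      (("https://www.bearlakecamp.com/retreats").toList, ("/retreats").toList),
      (("http://www.bearlakecamp.com/rentals").toList, ("/rentals").toList),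
      (("https://www.bearlakecamp.com/rentals").toList, ("/rentals").toList),
      (("http://www.bearlakecamp.com/partners-in-ministry").toList, ("/partners  <!-- TBD: Partners page not migrated yet -->").toList)] s :=
    mstep [(("http://www.bearlakecamp.com/summer-camp-2/").toList, ("/summer-camp").toList),
      (("https://www.bearlakecamp.com/summer-camp-2/").toList, ("/summer-camp").toList),
      (("http://www.bearlakecamp.com/retreats").toList, ("/retreats").toList),
      (("https://www.bearlakecamp.com/retreats").toList, ("/retreats").toList),
      (("http://www.bearlakecamp.com/rentals").toList, ("/rentals").toList),
      (("https://www.bearlakecamp.com/rentals").toList, ("/rentals").toList)] ("http://www.bearlakecamp.com/partners-in-ministry").toList ("/partners  <!-- TBD: Partners page not migrated yet -->").toList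
      (by decide) (by decide) (by decide) s.length s le_rfl
      (hpat_of_hD _ _ s hD (by decide))
  have e8 : mscan [(("https://www.bearlakecamp.com/partners-in-ministry").toList, ("/partners  <!-- TBD: Partners page not migrated yet -->").toList)] (mscan [(("http://www.bearlakecamp.com/summer-camp-2/").toList, ("/summer-camp").toList),
      (("https://www.bearlakecamp.com/summer-camp-2/").toList, ("/summer-camp").toList),
      (("http://www.bearlakecamp.com/retreats").toList, ("/retreats").toList),
      (("https://www.bearlakecamp.com/retreats").toList, ("/retreats").toList),
      (("http://www.bearlakecamp.com/rentals").toList, ("/rentals").toList),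
      (("https://www.bearlakecamp.com/rentals").toList, ("/rentals").toList),
      (("http://www.bearlakecamp.com/partners-in-ministry").toList, ("/partners  <!-- TBD: Partners page not migrated yet -->").toList)] s) = mscan [(("http://www.bearlakecamp.com/summer-camp-2/").toList, ("/summer-camp").toList),
      (("https://www.bearlakecamp.com/summer-camp-2/").toList, ("/summer-camp").toList),
      (("http://www.bearlakecamp.com/retreats").toList, ("/retreats").toList),
      (("https://www.bearlakecamp.com/retreats").toList, ("/retreats").toList),
      (("http://www.bearlakecamp.com/rentals").toList, ("/rentals").toList),
      (("https://www.bearlakecamp.com/rentals").toList, ("/rentals").toList),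
      (("http://www.bearlakecamp.com/partners-in-ministry").toList, ("/partners  <!-- TBD: Partners page not migrated yet -->").toList),
      (("https://www.bearlakecamp.com/partners-in-ministry").toList, ("/partners  <!-- TBD: Partners page not migrated yet -->").toList)] s :=
    mstep [(("http://www.bearlakecamp.com/summer-camp-2/").toList, ("/summer-camp").toList),
      (("https://www.bearlakecamp.com/summer-camp-2/").toList, ("/summer-camp").toList),
      (("http://www.bearlakecamp.com/retreats").toList, ("/retreats").toList),
      (("https://www.bearlakecamp.com/retreats").toList, ("/retreats").toList),
      (("http://www.bearlakecamp.com/rentals").toList, ("/rentals").toList),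
      (("https://www.bearlakecamp.com/rentals").toList, ("/rentals").toList),
      (("http://www.bearlakecamp.com/partners-in-ministry").toList, ("/partners  <!-- TBD: Partners page not migrated yet -->").toList)] ("https://www.bearlakecamp.com/partners-in-ministry").toList ("/partners  <!-- TBD: Partners page not migrated yet -->").toList
      (by decide) (by decide) (by decide) s.length s le_rfl
      (hpat_of_hD _ _ s hD (by decide))
  rw [e2, e3, e4, e5, e6, e7, e8]
  have hpv : pvKvs = [(("http://www.bearlakecamp.com/summer-camp-2/").toList, ("/summer-camp").toList),
      (("https://www.bearlakecamp.com/summer-camp-2/").toList, ("/summer-camp").toList),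
      (("http://www.bearlakecamp.com/retreats").toList, ("/retreats").toList),
      (("https://www.bearlakecamp.com/retreats").toList, ("/retreats").toList),
      (("http://www.bearlakecamp.com/rentals").toList, ("/rentals").toList),
      (("https://www.bearlakecamp.com/rentals").toList, ("/rentals").toList),
      (("http://www.bearlakecamp.com/partners-in-ministry").toList, ("/partners  <!-- TBD: Partners page not migrated yet -->").toList),
      (("https://www.bearlakecamp.com/partners-in-ministry").toList, ("/partners  <!-- TBD: Partners page not migrated yet -->").toList)] := by decide
  rw [hpv]

-- ===== VERDICT (by name: the statement is the Claim_ definition above) =====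
theorem fix_internal_links_spec : Claim_equal_fix_internal_links := by
  intro content _ hPre
  unfold Spec_fix_internal_links
  unfold Pre_fix_internal_links at hPre
  have hD' : ∀ p ∈ pvPatsC, ¬ p <:+: content.toList := by
    intro p hp hinf
    obtain ⟨sq, hsq, rfl⟩ := List.mem_map.mp hp
    exact hPre ⟨sq, hsq, (PySem.Chars.isIn_iff_infix _ _).mpr hinf⟩
  have hT : (fix_internal_links content).toList = (fix_internal_links_alt content).toList := by
    rw [A_toList, B_toList, chain content.toList hD']
  exact String.toList_inj.mp hT
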